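-- pv_equiv track=rewrite | github.com/lrieram/AdventOfCode | 2024/2/2.py | isSafeAsPart2
-- ===== SOURCE A (Python) =====
-- def isSafeAs(report):
--     for i in range(len(report)-1):
--         if report[i]>=report[i+1] or (report[i+1] - report[i])>3:
--             return False
--     return True
--
-- def isSafeAsPart2(report):
--     for i in range(len(report)-1):
--         if report[i]>=report[i+1] or (report[i+1] - report[i])>3:
--             reportSinActual = report.copy()
--             del reportSinActual[i]
--             reportSinSig = report.copy()
--             del reportSinSig[i+1]
--             return isSafeAs(reportSinActual) or isSafeAs(reportSinSig)
--     return True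
-- ===== SOURCE B (Python) =====
-- def _safe(xs):
--     return all(a < b <= a + 3 for a, b in zip(xs, xs[1:]))
--
-- def isSafeAsPart2(report):
--     if _safe(report):
--         return True
--     return any(_safe(report[:j] + report[j+1:]) for j in range(len(report)))
-- ===== Notes on version B (the rewrite author's own statement) =====
-- stated objective: simpler
-- what changed: B replaces A's single targeted pass (which retries only the two deletions at the first violation) with the plain brute-force dampener: safe as-is, or safe after deleting any one index, with the pair check written as all() over zip(xs, xs[1:]); equivalence holds because only deleting the first-violation index or its successor can ever repair a report.
import Mathlib
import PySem

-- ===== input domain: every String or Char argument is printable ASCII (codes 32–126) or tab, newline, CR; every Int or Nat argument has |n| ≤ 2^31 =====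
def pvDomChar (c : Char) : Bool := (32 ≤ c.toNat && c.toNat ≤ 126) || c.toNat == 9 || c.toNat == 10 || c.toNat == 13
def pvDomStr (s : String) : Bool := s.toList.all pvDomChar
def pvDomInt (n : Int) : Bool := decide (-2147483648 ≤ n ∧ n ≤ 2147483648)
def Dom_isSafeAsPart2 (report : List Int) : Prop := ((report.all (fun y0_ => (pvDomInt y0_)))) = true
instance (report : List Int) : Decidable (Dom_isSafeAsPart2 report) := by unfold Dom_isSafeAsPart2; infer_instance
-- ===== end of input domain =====

-- B replaces A's single targeted pass (retry with the two deletions at the first violation)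
-- by the plain brute-force dampener: safe as-is, or safe after deleting some one index (simpler).

-- ===== PORT A =====
-- loop of isSafeAs over i in range(len-1); indices i, i+1 are always in range, so getD 0 is exact
def isSafeAsGo (report : List Int) (i : Nat) : Bool :=
  if i < report.length - 1 then
    if report.getD i 0 ≥ report.getD (i+1) 0 ∨ report.getD (i+1) 0 - report.getD i 0 > 3 then
      false
    else isSafeAsGo report (i+1)
  else true
termination_by report.length - i

def isSafeAs (report : List Int) : Bool := isSafeAsGo report 0

-- loop of isSafeAsPart2; 'del l[i]' is List.eraseIdx i (exact for an in-range nonnegative index)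
def isSafeAsPart2Go (report : List Int) (i : Nat) : Bool :=
  if i < report.length - 1 then
    if report.getD i 0 ≥ report.getD (i+1) 0 ∨ report.getD (i+1) 0 - report.getD i 0 > 3 then
      isSafeAs (report.eraseIdx i) || isSafeAs (report.eraseIdx (i+1))
    else isSafeAsPart2Go report (i+1)
  else true
termination_by report.length - i

def isSafeAsPart2 (report : List Int) : Bool := isSafeAsPart2Go report 0

-- ===== PORT B =====
-- _safe: all(a < b <= a+3 for a, b in zip(xs, xs[1:])); xs[1:] is xs.tail (exact, clamped slice)
def safeB (xs : List Int) : Bool :=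
  (xs.zip xs.tail).all (fun p => decide (p.1 < p.2 ∧ p.2 ≤ p.1 + 3))

-- report[:j] + report[j+1:] is take j ++ drop (j+1) (exact: 0 ≤ j < len, clamped slices)
def isSafeAsPart2_alt (report : List Int) : Bool :=
  if safeB report then true
  else (List.range report.length).any (fun j => safeB (report.take j ++ report.drop (j+1)))

-- ===== PRECONDITION & SPEC =====
def Spec_isSafeAsPart2 (report : List Int) (out : Bool) : Prop := out = isSafeAsPart2_alt report
instance (report : List Int) (out : Bool) : Decidable (Spec_isSafeAsPart2 report out) := by unfold Spec_isSafeAsPart2; infer_instance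

-- ===== CLAIM (what is proved, stated in full; the proofs are below) =====
def Claim_equal_isSafeAsPart2 : Prop := ∀ (report : List Int), Dom_isSafeAsPart2 report → Spec_isSafeAsPart2 report (isSafeAsPart2 report)

-- ===== LEMMAS AND PROOFS =====

-- the good-pair predicate at index k (k, k+1 both in range whenever it is used)
def goodAt (r : List Int) (k : Nat) : Prop :=
  r.getD k 0 < r.getD (k+1) 0 ∧ r.getD (k+1) 0 ≤ r.getD k 0 + 3

theorem charGo (r : List Int) (i : Nat) :
    isSafeAsGo r i = true ↔ ∀ k, i ≤ k → k + 1 < r.length → goodAt r k := by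
  fun_induction isSafeAsGo r i with
  | case1 i hlt hbad =>
    simp only [Bool.false_eq_true, false_iff]
    intro h
    have := h i le_rfl (by omega)
    unfold goodAt at this
    omega
  | case2 i hlt hgood ih =>
    rw [ih]
    constructor
    · intro h k hik hk
      rcases Nat.eq_or_lt_of_le hik with rfl | hik'
      · exact ⟨by omega, by omega⟩
      · exact h k hik' hk
    · intro h k hik hk
      exact h k (by omega) hk
  | case3 i hge =>
    simp only [true_iff]
    intro k hik hk
    omega

theorem charSafeB (r : List Int) :
    safeB r = true ↔ ∀ k, k + 1 < r.length → goodAt r k := by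
  unfold safeB
  rw [List.all_eq_true]
  constructor
  · intro h k hk
    have hlen : k < (r.zip r.tail).length := by
      simp [List.length_zip, List.length_tail]; omega
    have hm := h ((r.zip r.tail)[k]) (List.getElem_mem hlen)
    have hz : (r.zip r.tail)[k] = (r[k]'(by omega), r.tail[k]'(by simp [List.length_tail]; omega)) :=
      List.getElem_zip
    have ht : r.tail[k]'(by simp [List.length_tail]; omega) = r[k+1]'(by omega) := by
      simp [List.getElem_tail]
    rw [hz, ht] at hm
    simp only [decide_eq_true_eq] at hm
    unfold goodAt
    rw [List.getD_eq_getElem r 0 (by omega : k < r.length),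
        List.getD_eq_getElem r 0 (by omega : k + 1 < r.length)]
    exact hm
  · intro h p hp
    obtain ⟨k, hk, hpk⟩ := List.mem_iff_getElem.mp hp
    have hklen : k + 1 < r.length := by
      have := hk; simp [List.length_zip, List.length_tail] at this; omega
    have := h k hklen
    unfold goodAt at this
    rw [List.getD_eq_getElem r 0 (by omega : k < r.length),
        List.getD_eq_getElem r 0 hklen] at this
    have hz : (r.zip r.tail)[k]'hk = (r[k]'(by omega), r.tail[k]'(by simp [List.length_tail]; omega)) :=
      List.getElem_zip
    have ht : r.tail[k]'(by simp [List.length_tail]; omega) = r[k+1]'hklen := by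
      simp [List.getElem_tail]
    rw [hz, ht] at hpk
    subst hpk
    simp only [decide_eq_true_eq]
    exact this

theorem safeB_eq_isSafeAs (r : List Int) : safeB r = isSafeAs r := by
  unfold isSafeAs
  by_cases h : safeB r = true
  · rw [h]
    exact ((charGo r 0).mpr (fun k _ hk => (charSafeB r).mp h k hk)).symm
  · rw [Bool.not_eq_true] at h
    rw [h]
    rcases hA : isSafeAsGo r 0 with _ | _
    · rfl
    · exact absurd ((charSafeB r).mpr (fun k hk => (charGo r 0).mp hA k (Nat.zero_le k) hk)) (by simp [h])

-- elements of an erased list, as a getD fact (indices guarded to be in range)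
theorem len_eraseIdx (r : List Int) (j : Nat) (hj : j < r.length) :
    (r.eraseIdx j).length = r.length - 1 := List.length_eraseIdx_of_lt hj

theorem getD_eraseIdx_lt (r : List Int) (j k : Nat) (hjr : j < r.length) (hk : k < j)
    (hr : k < (r.eraseIdx j).length) :
    (r.eraseIdx j).getD k 0 = r.getD k 0 := by
  rw [List.getD_eq_getElem _ 0 hr, List.getD_eq_getElem r 0 (by omega)]
  rw [List.getElem_eraseIdx]
  simp [hk]

theorem getD_eraseIdx_ge (r : List Int) (j k : Nat) (hjr : j < r.length) (hk : j ≤ k)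
    (hr : k < (r.eraseIdx j).length) :
    (r.eraseIdx j).getD k 0 = r.getD (k+1) 0 := by
  have hlen := len_eraseIdx r j hjr
  rw [List.getD_eq_getElem _ 0 hr, List.getD_eq_getElem r 0 (by omega)]
  rw [List.getElem_eraseIdx]
  simp [Nat.not_lt.mpr hk]

-- deleting an index other than i or i+1 cannot repair a bad pair at (i, i+1)
theorem erase_other_unsafe (r : List Int) (i j : Nat) (hi : i + 1 < r.length)
    (hbad : ¬ goodAt r i) (hj : j < r.length) (hne1 : j ≠ i) (hne2 : j ≠ i + 1) :
    safeB (r.eraseIdx j) = false := by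
  rw [← Bool.not_eq_true, charSafeB]
  intro h
  rcases Nat.lt_or_ge j i with hji | hji
  · -- j < i: the bad pair sits at index i-1 of the erased list
    have h1 : i - 1 + 1 < (r.eraseIdx j).length := by rw [len_eraseIdx r j hj]; omega
    have := h (i - 1) h1
    unfold goodAt at this
    rw [getD_eraseIdx_ge r j (i-1) hj (by omega) (by omega),
        getD_eraseIdx_ge r j (i-1+1) hj (by omega) h1] at this
    have e1 : i - 1 + 1 = i := by omega
    rw [e1] at this
    exact hbad this
  · -- j > i+1: the bad pair stays at index i
    have hji' : i + 1 < j := by omega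
    have h1 : i + 1 < (r.eraseIdx j).length := by rw [len_eraseIdx r j hj]; omega
    have := h i h1
    unfold goodAt at this
    rw [getD_eraseIdx_lt r j i hj (by omega) (by omega),
        getD_eraseIdx_lt r j (i+1) hj (by omega) h1] at this
    exact hbad this

theorem take_drop_eq_erase (r : List Int) (j : Nat) :
    r.take j ++ r.drop (j+1) = r.eraseIdx j := (List.eraseIdx_eq_take_drop_succ r j).symm

theorem part2_aux (r : List Int) (i : Nat)
    (hpre : ∀ k, k < i → k + 1 < r.length → goodAt r k) :
    isSafeAsPart2Go r i = isSafeAsPart2_alt r := by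
  fun_induction isSafeAsPart2Go r i with
  | case1 i hlt hbad =>
    -- first violation found at i
    have hi1 : i + 1 < r.length := by omega
    have hbad' : ¬ goodAt r i := by unfold goodAt; omega
    have hsafe : safeB r = false := by
      rw [← Bool.not_eq_true, charSafeB]
      intro h; exact hbad' (h i hi1)
    have halt : isSafeAsPart2_alt r
        = (List.range r.length).any (fun j => safeB (r.take j ++ r.drop (j+1))) := by
      unfold isSafeAsPart2_alt
      rw [hsafe]
      simp
    rw [halt]
    rcases hL : (isSafeAs (r.eraseIdx i) || isSafeAs (r.eraseIdx (i+1))) with _ | _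
    · -- both deletions fail: every deletion fails
      simp only [Bool.or_eq_false_iff] at hL
      symm
      rw [← Bool.not_eq_true, List.any_eq_true]
      rintro ⟨j, hj, hsj⟩
      rw [List.mem_range] at hj
      rw [take_drop_eq_erase] at hsj
      by_cases h1 : j = i
      · subst h1; rw [safeB_eq_isSafeAs, hL.1] at hsj; exact absurd hsj (by simp)
      by_cases h2 : j = i + 1
      · subst h2; rw [safeB_eq_isSafeAs, hL.2] at hsj; exact absurd hsj (by simp)
      rw [erase_other_unsafe r i j hi1 hbad' hj h1 h2] at hsj
      exact absurd hsj (by simp)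
    · -- one of the two deletions works: it is the witness for 'any'
      symm
      rw [List.any_eq_true]
      rcases Bool.or_eq_true_iff.mp hL with h | h
      · exact ⟨i, List.mem_range.mpr (by omega), by rw [take_drop_eq_erase, safeB_eq_isSafeAs, h]⟩
      · exact ⟨i+1, List.mem_range.mpr hi1, by rw [take_drop_eq_erase, safeB_eq_isSafeAs, h]⟩
  | case2 i hlt hgood ih =>
    exact ih (by
      intro k hk hklen
      rcases Nat.lt_or_ge k i with h | h
      · exact hpre k h hklen
      · have : k = i := by omega
        subst this
        unfold goodAt
        omega)
  | case3 i hge =>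
    -- no violation from i on, and none before i: the report is safe
    have hsafe : safeB r = true := by
      rw [charSafeB]
      intro k hk
      exact hpre k (by omega) hk
    unfold isSafeAsPart2_alt
    rw [hsafe]
    simp

-- ===== VERDICT (by name: the statement is the Claim_ definition above) =====
theorem isSafeAsPart2_spec : Claim_equal_isSafeAsPart2 := by
  intro report _
  unfold Spec_isSafeAsPart2 isSafeAsPart2
  exact part2_aux report 0 (by omega)
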